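-- pv_equiv track=rewrite | github.com/sonder-art/rtorneo_wordle_p26 | estudiantes/equipo_PaN/strategy.py | pattern_code
-- ===== SOURCE A (Python) =====
-- def pattern_code(secret_codes: tuple[int, ...], guess_codes: tuple[int, ...]) -> int:
--     """Feedback Wordle (0/1/2) -> entero base-3. Maneja duplicados."""
--     L = len(secret_codes)
--     pat = [0] * L
--
--     remaining: dict[int, int] = {}
--     for s in secret_codes:
--         remaining[s] = remaining.get(s, 0) + 1
--
--     for i in range(L):
--         g = guess_codes[i]
--         s = secret_codes[i]
--         if g == s:
--             pat[i] = 2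
--             remaining[g] -= 1
--
--     for i in range(L):
--         if pat[i] == 2:
--             continue
--         g = guess_codes[i]
--         cnt = remaining.get(g, 0)
--         if cnt > 0:
--             pat[i] = 1
--             remaining[g] = cnt - 1
--
--     code = 0
--     for x in pat:
--         code = code * 3 + x
--     return code
-- ===== SOURCE B (Python) =====
-- def pattern_code(secret_codes: tuple[int, ...], guess_codes: tuple[int, ...]) -> int:
--     """Per-position closed form: a slot is green if it matches; otherwise it is
--     yellow iff the number of earlier non-green guess slots with the same letter
--     is below the total number of non-green secret slots holding that letter."""
--     L = len(secret_codes)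
--     digits = [
--         2 if guess_codes[i] == secret_codes[i]
--         else (1 if sum(1 for k in range(i)
--                        if guess_codes[k] == guess_codes[i]
--                        and guess_codes[k] != secret_codes[k])
--                  < sum(1 for j in range(L)
--                        if secret_codes[j] == guess_codes[i]
--                        and secret_codes[j] != guess_codes[j])
--               else 0)
--         for i in range(L)
--     ]
--     code = 0
--     for d in digits:
--         code = code * 3 + d
--     return code
-- ===== Notes on version B (the rewrite author's own statement) =====
-- stated objective: alternative
-- what changed: Replaced A's three stateful passes with a mutable pattern array and a remaining-count dict by a stateless per-position closed form: each slot is green if it matches, and yellow iff the count of earlier non-green guess slots with that letter is below the total non-green secret count of that letter.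
import Mathlib
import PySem

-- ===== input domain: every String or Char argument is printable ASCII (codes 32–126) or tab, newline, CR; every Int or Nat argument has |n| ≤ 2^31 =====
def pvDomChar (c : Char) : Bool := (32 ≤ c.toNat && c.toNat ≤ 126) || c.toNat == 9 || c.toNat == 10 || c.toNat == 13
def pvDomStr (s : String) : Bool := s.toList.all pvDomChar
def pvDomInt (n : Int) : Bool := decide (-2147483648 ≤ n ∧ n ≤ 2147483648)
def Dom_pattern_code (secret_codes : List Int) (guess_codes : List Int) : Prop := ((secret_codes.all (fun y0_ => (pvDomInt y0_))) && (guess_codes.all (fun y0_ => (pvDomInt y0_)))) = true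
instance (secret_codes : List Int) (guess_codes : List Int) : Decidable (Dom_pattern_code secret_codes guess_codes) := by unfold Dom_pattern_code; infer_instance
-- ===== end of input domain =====

-- B replaces A's three stateful passes (pattern array + remaining-count dict) by a
-- stateless per-position closed form (count-based yellow rule); alternative, not faster.


-- shared indexing helper: xs[i] for a Nat index; exact for i < xs.length (guaranteed by Pre_)
def pvGetI (xs : List Int) (i : Nat) : Int := xs.getD i 0

-- ===== PORT A =====
def pattern_code (secret_codes : List Int) (guess_codes : List Int) : Int :=
  let L := secret_codes.length
  let pat : List Int := List.replicate L 0
  let remaining : PySem.Dict Int Int :=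
    secret_codes.foldl (fun d s => d.insert s (d.getD s 0 + 1)) PySem.Dict.empty
  let st1 := (List.range L).foldl
    (fun (st : List Int × PySem.Dict Int Int) i =>
      let g := pvGetI guess_codes i
      let s := pvGetI secret_codes i
      if g = s then (st.1.set i 2, st.2.insert g (st.2.getD g 0 - 1)) else st)
    (pat, remaining)
  let st2 := (List.range L).foldl
    (fun (st : List Int × PySem.Dict Int Int) i =>
      if st.1.getD i 0 = 2 then st
      else
        let g := pvGetI guess_codes i
        let cnt := st.2.getD g 0
        if cnt > 0 then (st.1.set i 1, st.2.insert g (cnt - 1)) else st)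
    st1
  st2.1.foldl (fun code x => code * 3 + x) 0

-- ===== PORT B =====
def pattern_code_alt (secret_codes : List Int) (guess_codes : List Int) : Int :=
  let L := secret_codes.length
  let digits := (List.range L).map (fun i =>
    if pvGetI guess_codes i = pvGetI secret_codes i then (2 : Int)
    else if (List.range i).countP
              (fun k => pvGetI guess_codes k = pvGetI guess_codes i ∧
                        pvGetI guess_codes k ≠ pvGetI secret_codes k)
          < (List.range L).countP
              (fun j => pvGetI secret_codes j = pvGetI guess_codes i ∧
                        pvGetI secret_codes j ≠ pvGetI guess_codes j)
      then 1 else 0)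
  digits.foldl (fun code d => code * 3 + d) 0

-- ===== PRECONDITION & SPEC =====
-- Pre_ excludes exactly the inputs where A raises IndexError: guess shorter than secret.
def Pre_pattern_code (secret_codes : List Int) (guess_codes : List Int) : Prop :=
  secret_codes.length ≤ guess_codes.length
instance (secret_codes : List Int) (guess_codes : List Int) : Decidable (Pre_pattern_code secret_codes guess_codes) := by unfold Pre_pattern_code; infer_instance
def pvWitness_pattern_code : List Int × List Int := ([1, 2, 2], [2, 2, 1])

def Spec_pattern_code (secret_codes : List Int) (guess_codes : List Int) (out : Int) : Prop := out = pattern_code_alt secret_codes guess_codes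
instance (secret_codes : List Int) (guess_codes : List Int) (out : Int) : Decidable (Spec_pattern_code secret_codes guess_codes out) := by unfold Spec_pattern_code; infer_instance

-- ===== CLAIM (what is proved, stated in full; the proofs are below) =====
def Claim_equal_pattern_code : Prop := ∀ (secret_codes : List Int) (guess_codes : List Int), Dom_pattern_code secret_codes guess_codes → Pre_pattern_code secret_codes guess_codes → Spec_pattern_code secret_codes guess_codes (pattern_code secret_codes guess_codes)

-- ===== LEMMAS AND PROOFS =====

-- invariant rule for a left fold over `List.range n`
theorem pvFoldRangeInv {σ : Type} (f : σ → Nat → σ) (I : Nat → σ → Prop) (init : σ) (n : Nat)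
    (h0 : I 0 init) (hstep : ∀ m st, m < n → I m st → I (m + 1) (f st m)) :
    I n ((List.range n).foldl f init) := by
  induction n with
  | zero => simpa using h0
  | succ n ih =>
    rw [List.range_succ, List.foldl_append]
    exact hstep n _ (Nat.lt_succ_self n) (ih (fun m st hm => hstep m st (Nat.lt_succ_of_lt hm)))

-- countP split of a predicate along a second condition (used to relate count, greens, avail)
theorem pvCountPSplit {α : Type} (l : List α) (p q : α → Bool) :
    l.countP p = l.countP (fun a => p a && q a) + l.countP (fun a => p a && !q a) := by
  induction l with
  | nil => simp
  | cons x xs ih =>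
    by_cases hp : p x <;> by_cases hq : q x <;> simp [hp, hq, ih] <;> try omega

-- xs.count c as a countP over index range
theorem pvCountRange (xs : List Int) (c : Int) :
    xs.count c = (List.range xs.length).countP (fun j => decide (pvGetI xs j = c)) := by
  have h : xs = (List.range xs.length).map (fun j => pvGetI xs j) := by
    apply List.ext_getElem
    · simp
    · intro i h1 h2
      simp [pvGetI, List.getD_eq_getElem?_getD, List.getElem?_eq_getElem h1]
  conv_lhs => rw [h]
  rw [List.count_eq_countP, List.countP_map]
  apply List.countP_congr
  intro j _
  by_cases h : pvGetI xs j = c <;> simp [h]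

theorem pvGetDSet (xs : List Int) (i j : Nat) (v : Int) :
    (xs.set i v).getD j 0 = if i = j ∧ i < xs.length then v else xs.getD j 0 := by
  simp only [List.getD_eq_getElem?_getD, List.getElem?_set]
  split_ifs with h1 h2 <;> simp_all
  omega

theorem pvGetDIns (d : PySem.Dict Int Int) (k k' v : Int) :
    (d.insert k v).getD k' 0 = if k' = k then v else d.getD k' 0 := by
  by_cases h : k' = k
  · subst h; simp [PySem.Dict.getD_insert_self]
  · rw [PySem.Dict.getD_insert_of_ne d v 0 h]; simp [h]

-- the per-position digit B computes
def pvGreens (s g : List Int) (m : Nat) (c : Int) : Nat :=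
  (List.range m).countP (fun j => decide (pvGetI s j = c ∧ pvGetI g j = pvGetI s j))

def pvAvail (s g : List Int) (c : Int) : Nat :=
  (List.range s.length).countP (fun j => decide (pvGetI s j = c ∧ pvGetI s j ≠ pvGetI g j))

def pvRank (s g : List Int) (m : Nat) (c : Int) : Nat :=
  (List.range m).countP (fun k => decide (pvGetI g k = c ∧ pvGetI g k ≠ pvGetI s k))

def pvDgt (s g : List Int) (i : Nat) : Int :=
  if pvGetI g i = pvGetI s i then 2
  else if pvRank s g i (pvGetI g i) < pvAvail s g (pvGetI g i) then 1 else 0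

-- avail = total count minus green count
theorem pvAvailEq (s g : List Int) (c : Int) :
    (pvAvail s g c : Int) = (s.count c : Int) - (pvGreens s g s.length c : Int) := by
  have := pvCountPSplit (List.range s.length)
    (fun j => decide (pvGetI s j = c)) (fun j => decide (pvGetI g j = pvGetI s j))
  rw [pvCountRange s c]
  unfold pvAvail pvGreens
  have e1 : (List.range s.length).countP
      (fun j => decide (pvGetI s j = c ∧ pvGetI s j ≠ pvGetI g j)) =
      (List.range s.length).countP
      (fun a => decide (pvGetI s a = c) && !decide (pvGetI g a = pvGetI s a)) := by
    apply List.countP_congr; intro j _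
    by_cases h1 : pvGetI s j = c
    all_goals by_cases h2 : pvGetI g j = pvGetI s j
    all_goals simp [h1, h2]
    all_goals try omega
  have e2 : (List.range s.length).countP
      (fun j => decide (pvGetI s j = c ∧ pvGetI g j = pvGetI s j)) =
      (List.range s.length).countP
      (fun a => decide (pvGetI s a = c) && decide (pvGetI g a = pvGetI s a)) := by
    apply List.countP_congr; intro j _
    by_cases h1 : pvGetI s j = c <;> by_cases h2 : pvGetI g j = pvGetI s j <;> simp [h1, h2]
  rw [e1, e2]
  omega

-- ===== pass 1 (greens) =====
theorem pvPass1 (s g : List Int) :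
    (fun st : List Int × PySem.Dict Int Int =>
      st.1.length = s.length ∧
      (∀ j, st.1.getD j 0 = if j < s.length ∧ pvGetI g j = pvGetI s j then 2 else 0) ∧
      (∀ c, st.2.getD c 0 = (s.count c : Int) - (pvGreens s g s.length c : Int)))
    ((List.range s.length).foldl
      (fun (st : List Int × PySem.Dict Int Int) i =>
        let gg := pvGetI g i
        let ss := pvGetI s i
        if gg = ss then (st.1.set i 2, st.2.insert gg (st.2.getD gg 0 - 1)) else st)
      (List.replicate s.length 0,
       s.foldl (fun d x => d.insert x (d.getD x 0 + 1)) PySem.Dict.empty)) := by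
  have main := pvFoldRangeInv
    (fun (st : List Int × PySem.Dict Int Int) i =>
      let gg := pvGetI g i
      let ss := pvGetI s i
      if gg = ss then (st.1.set i 2, st.2.insert gg (st.2.getD gg 0 - 1)) else st)
    (fun m st =>
      st.1.length = s.length ∧
      (∀ j, st.1.getD j 0 = if j < m ∧ pvGetI g j = pvGetI s j then 2 else 0) ∧
      (∀ c, st.2.getD c 0 = (s.count c : Int) - (pvGreens s g m c : Int)))
    (List.replicate s.length 0,
     s.foldl (fun d x => d.insert x (d.getD x 0 + 1)) PySem.Dict.empty)
    s.length ?base ?step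
  · obtain ⟨h1, h2, h3⟩ := main
    refine ⟨h1, ?_, h3⟩
    intro j; rw [h2 j]
  case base =>
    refine ⟨by simp, ?_, ?_⟩
    · intro j; simp [List.getD_eq_getElem?_getD, List.getElem?_replicate]
      split_ifs <;> simp_all
    · intro c
      rw [PySem.Dict.foldl_insert_getD_add_one_eq_counter s, PySem.Dict.getD_counter]
      simp [pvGreens]
  case step =>
    intro m st hm ⟨h1, h2, h3⟩
    simp only
    have hgreens : ∀ c, pvGreens s g (m + 1) c =
        pvGreens s g m c + if pvGetI s m = c ∧ pvGetI g m = pvGetI s m then 1 else 0 := by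
      intro c
      unfold pvGreens
      rw [List.range_succ, List.countP_append]
      simp
    by_cases hg : pvGetI g m = pvGetI s m
    · simp only [hg, if_true]
      refine ⟨by simp [h1], ?_, ?_⟩
      · intro j
        rw [pvGetDSet, h1]
        rcases eq_or_ne m j with rfl | hne
        · simp [hm, hg]
        · rw [h2 j, if_neg (by simp [hne])]
          have : (j < m + 1 ∧ pvGetI g j = pvGetI s j) ↔ (j < m ∧ pvGetI g j = pvGetI s j) := by
            constructor
            · rintro ⟨hj, he⟩; exact ⟨by omega, he⟩
            · rintro ⟨hj, he⟩; exact ⟨by omega, he⟩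
          exact (if_congr this rfl rfl).symm
      · intro c
        rw [pvGetDIns, hgreens c, h3 c]
        rcases eq_or_ne c (pvGetI s m) with rfl | hne
        · rw [h3]; simp [hg]; ring
        · rw [if_neg hne, if_neg (fun hx => hne hx.1.symm)]
          simp
    · simp only [if_neg hg]
      refine ⟨h1, ?_, ?_⟩
      · intro j
        rw [h2 j]
        rcases eq_or_ne m j with rfl | hne
        · simp [hg]
        · have : (j < m + 1 ∧ pvGetI g j = pvGetI s j) ↔ (j < m ∧ pvGetI g j = pvGetI s j) := by
            constructor
            · rintro ⟨hj, he⟩; exact ⟨by omega, he⟩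
            · rintro ⟨hj, he⟩; exact ⟨by omega, he⟩
          rw [if_congr this rfl rfl]
      · intro c
        rw [h3 c, hgreens c]
        have : ¬(pvGetI s m = c ∧ pvGetI g m = pvGetI s m) := fun ⟨_, h⟩ => hg h
        simp [this]

-- ===== pass 2 (yellows) =====
theorem pvPass2 (s g : List Int) (init : List Int × PySem.Dict Int Int)
    (h1 : init.1.length = s.length)
    (h2 : ∀ j, init.1.getD j 0 = if j < s.length ∧ pvGetI g j = pvGetI s j then 2 else 0)
    (h3 : ∀ c, init.2.getD c 0 = (pvAvail s g c : Int)) :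
    (fun st : List Int × PySem.Dict Int Int =>
      st.1.length = s.length ∧
      (∀ j, st.1.getD j 0 = if j < s.length then pvDgt s g j else 0))
    ((List.range s.length).foldl
      (fun (st : List Int × PySem.Dict Int Int) i =>
        if st.1.getD i 0 = 2 then st
        else
          let gg := pvGetI g i
          let cnt := st.2.getD gg 0
          if cnt > 0 then (st.1.set i 1, st.2.insert gg (cnt - 1)) else st)
      init) := by
  have main := pvFoldRangeInv
    (fun (st : List Int × PySem.Dict Int Int) i =>
      if st.1.getD i 0 = 2 then st
      else
        let gg := pvGetI g i
        let cnt := st.2.getD gg 0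
        if cnt > 0 then (st.1.set i 1, st.2.insert gg (cnt - 1)) else st)
    (fun m st =>
      st.1.length = s.length ∧
      (∀ j, st.1.getD j 0 =
        if j < m then pvDgt s g j
        else if j < s.length ∧ pvGetI g j = pvGetI s j then 2 else 0) ∧
      (∀ c, st.2.getD c 0 =
        (pvAvail s g c : Int) - ((min (pvAvail s g c) (pvRank s g m c) : Nat) : Int)))
    init s.length ?base ?step
  · obtain ⟨a1, a2, _⟩ := main
    refine ⟨a1, ?_⟩
    intro j
    rw [a2 j]
    by_cases hj : j < s.length
    · simp [hj]
    · simp [hj]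
  case base =>
    refine ⟨h1, ?_, ?_⟩
    · intro j; rw [h2 j]; simp
    · intro c; rw [h3 c]; simp [pvRank]
  case step =>
    intro m st hm ⟨k1, k2, k3⟩
    simp only
    have hrank : ∀ c, pvRank s g (m + 1) c =
        pvRank s g m c + if pvGetI g m = c ∧ pvGetI g m ≠ pvGetI s m then 1 else 0 := by
      intro c; unfold pvRank; rw [List.range_succ, List.countP_append]; simp
    have hpatm : st.1.getD m 0 = if pvGetI g m = pvGetI s m then 2 else 0 := by
      rw [k2 m]; simp [hm]
    by_cases hg : pvGetI g m = pvGetI s m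
    · -- green slot: value 2, loop body skips
      have hv : st.1.getD m 0 = 2 := by rw [hpatm, if_pos hg]
      rw [if_pos hv]
      refine ⟨k1, ?_, ?_⟩
      · intro j; rw [k2 j]
        rcases lt_trichotomy j m with hj | rfl | hj
        · simp [hj, Nat.lt_succ_of_lt hj]
        · simp [hm, hg, pvDgt]
        · have hj1 : ¬ j < m := by omega
          have hj2 : ¬ j < m + 1 := by omega
          simp [hj1, hj2]
      · intro c; rw [k3 c, hrank c]
        have hx : ¬(pvGetI g m = c ∧ pvGetI g m ≠ pvGetI s m) := fun h => h.2 hg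
        simp [hx]
    · -- non-green slot
      have hv : st.1.getD m 0 = 0 := by rw [hpatm, if_neg hg]
      have hne2 : ¬ st.1.getD m 0 = 2 := by rw [hv]; norm_num
      rw [if_neg hne2]
      by_cases hcnt : st.2.getD (pvGetI g m) 0 > 0
      · rw [if_pos hcnt]
        have hk := k3 (pvGetI g m)
        have hfacts : min (pvAvail s g (pvGetI g m)) (pvRank s g m (pvGetI g m)) =
              pvRank s g m (pvGetI g m) ∧
            pvRank s g m (pvGetI g m) < pvAvail s g (pvGetI g m) := by
          rw [hk] at hcnt; push_cast at hcnt; omega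
        refine ⟨by simp [k1], ?_, ?_⟩
        · intro j
          rw [pvGetDSet, k1]
          rcases lt_trichotomy j m with hj | rfl | hj
          · have hmj : ¬ (m = j ∧ m < s.length) := fun h => by omega
            rw [if_neg hmj, k2 j, if_pos hj, if_pos (Nat.lt_succ_of_lt hj)]
          · rw [if_pos ⟨rfl, hm⟩, if_pos (Nat.lt_succ_self j)]
            simp [pvDgt, hg, hfacts.2]
          · have hmj : ¬ (m = j ∧ m < s.length) := fun h => by omega
            have hj1 : ¬ j < m := by omega
            have hj2 : ¬ j < m + 1 := by omega
            rw [if_neg hmj, k2 j, if_neg hj1, if_neg hj2]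
        · intro c
          rw [pvGetDIns, k3 c, hrank c]
          rcases eq_or_ne c (pvGetI g m) with hce | hne
          · subst hce
            rw [if_pos rfl, hk, if_pos ⟨rfl, hg⟩]
            have hf := hfacts
            omega
          · rw [if_neg hne]
            have hx : ¬(pvGetI g m = c ∧ pvGetI g m ≠ pvGetI s m) := fun h => hne h.1.symm
            simp [hx]
      · rw [if_neg hcnt]
        have hk := k3 (pvGetI g m)
        have hge : pvAvail s g (pvGetI g m) ≤ pvRank s g m (pvGetI g m) := by
          rw [hk] at hcnt; push_cast at hcnt; omega
        refine ⟨k1, ?_, ?_⟩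
        · intro j; rw [k2 j]
          rcases lt_trichotomy j m with hj | rfl | hj
          · simp [hj, Nat.lt_succ_of_lt hj]
          · have : ¬ pvRank s g j (pvGetI g j) < pvAvail s g (pvGetI g j) := by omega
            simp [hm, hg, pvDgt, this]
          · have hj1 : ¬ j < m := by omega
            have hj2 : ¬ j < m + 1 := by omega
            simp [hj1, hj2]
        · intro c; rw [k3 c, hrank c]
          rcases eq_or_ne c (pvGetI g m) with hce | hne
          · subst hce
            rw [if_pos ⟨rfl, hg⟩]
            push_cast
            omega
          · have hx : ¬(pvGetI g m = c ∧ pvGetI g m ≠ pvGetI s m) := fun h => hne h.1.symm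
            simp [hx]

-- assembling the two passes: A's final pattern list is exactly B's digits list
theorem pvMain (s g : List Int) : pattern_code s g = pattern_code_alt s g := by
  have hA : pattern_code s g =
      ((List.range s.length).foldl
        (fun (st : List Int × PySem.Dict Int Int) i =>
          if st.1.getD i 0 = 2 then st
          else
            let gg := pvGetI g i
            let cnt := st.2.getD gg 0
            if cnt > 0 then (st.1.set i 1, st.2.insert gg (cnt - 1)) else st)
        ((List.range s.length).foldl
          (fun (st : List Int × PySem.Dict Int Int) i =>
            let gg := pvGetI g i
            let ss := pvGetI s i
            if gg = ss then (st.1.set i 2, st.2.insert gg (st.2.getD gg 0 - 1)) else st)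
          (List.replicate s.length 0,
           s.foldl (fun d x => d.insert x (d.getD x 0 + 1)) PySem.Dict.empty))).1.foldl
        (fun code x => code * 3 + x) 0 := rfl
  have hB : pattern_code_alt s g =
      ((List.range s.length).map (fun i => pvDgt s g i)).foldl
        (fun code d => code * 3 + d) 0 := rfl
  rw [hA, hB]
  obtain ⟨l1, p1, r1⟩ := pvPass1 s g
  have h3' : ∀ c,
      ((List.range s.length).foldl
        (fun (st : List Int × PySem.Dict Int Int) i =>
          let gg := pvGetI g i
          let ss := pvGetI s i
          if gg = ss then (st.1.set i 2, st.2.insert gg (st.2.getD gg 0 - 1)) else st)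
        (List.replicate s.length 0,
         s.foldl (fun d x => d.insert x (d.getD x 0 + 1)) PySem.Dict.empty)).2.getD c 0 =
      (pvAvail s g c : Int) := by
    intro c; rw [r1 c, pvAvailEq]
  obtain ⟨l2, p2⟩ := pvPass2 s g _ l1 p1 h3'
  congr 1
  apply List.ext_getElem
  · rw [List.length_map, List.length_range]; exact l2
  · intro i hi1 hi2
    have hiL : i < s.length := by rw [l2] at hi1; exact hi1
    have hconv : ∀ (xs : List Int) (_ : i < xs.length), xs[i] = xs.getD i 0 :=
      fun xs hi => by rw [List.getD_eq_getElem?_getD, List.getElem?_eq_getElem hi]; rfl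
    rw [List.getElem_map, List.getElem_range, hconv _ hi1, p2 i, if_pos hiL]

-- ===== VERDICT (by name: the statement is the Claim_ definition above) =====
theorem pattern_code_spec : Claim_equal_pattern_code := by
  intro s g _ _
  unfold Spec_pattern_code
  exact pvMain s g
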